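-- pv_equiv track=rewrite | github.com/appinha/advent_of_code-2021 | my_solutions/day_06/main.py | _spawn_for
-- ===== SOURCE A (Python) =====
-- def _spawn_for(timers, days):
--     day = 0
--     while day < days:
--         new_timers = []
--         for timer in timers:
--             if timer == 0:
--                 new_timers.append(6)
--                 new_timers.append(8)
--             else:
--                 new_timers.append(timer - 1)
--         timers = new_timers
--         day += 1
--     return timers
-- ===== SOURCE B (Python) =====
-- def _spawn_for(timers, days):
--     result = []
--     for t in timers:
--         stack = [(t, days)]
--         while stack:
--             timer, d = stack.pop()
--             if d <= 0:
--                 result.append(timer)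
--             elif timer == 0:
--                 stack.append((8, d - 1))
--                 stack.append((6, d - 1))
--             else:
--                 stack.append((timer - 1, d - 1))
--     return result
-- ===== Notes on version B (the rewrite author's own statement) =====
-- stated objective: alternative
-- what changed: Replaces the breadth-first day-by-day rewrite of the whole population list by a per-fish depth-first expansion (explicit stack) of each fish's lineage, concatenating the blocks in input order.
import Mathlib
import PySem

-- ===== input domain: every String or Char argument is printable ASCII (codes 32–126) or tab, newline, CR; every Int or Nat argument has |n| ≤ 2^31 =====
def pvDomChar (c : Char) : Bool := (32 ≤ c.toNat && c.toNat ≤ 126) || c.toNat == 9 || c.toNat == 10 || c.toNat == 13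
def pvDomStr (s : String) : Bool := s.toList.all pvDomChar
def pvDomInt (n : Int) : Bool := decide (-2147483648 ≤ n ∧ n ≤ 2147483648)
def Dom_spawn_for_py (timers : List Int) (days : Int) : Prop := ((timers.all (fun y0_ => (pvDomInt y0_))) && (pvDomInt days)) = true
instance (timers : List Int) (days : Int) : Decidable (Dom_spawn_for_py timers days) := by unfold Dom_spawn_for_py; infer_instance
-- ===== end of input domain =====

-- B replaces A's breadth-first day-by-day rewrite of the whole list by a per-fish
-- depth-first (explicit stack) expansion of each fish's lineage, concatenated in order
-- (objective: alternative decomposition, same exact results).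


-- ===== PORT A =====
-- inner 'for timer in timers' loop of one day
def spawnStep (timers : List Int) : List Int :=
  timers.foldl (fun acc timer => if timer = 0 then (acc ++ [6]) ++ [8] else acc ++ [timer - 1]) []

-- 'day = 0; while day < days: …' — iterates max(days,0) times
def spawnLoop : Nat → List Int → List Int
  | 0, timers => timers
  | n + 1, timers => spawnLoop n (spawnStep timers)

def spawn_for_py (timers : List Int) (days : Int) : List Int :=
  spawnLoop days.toNat timers

-- ===== PORT B =====
-- 'while stack: …' depth-first expansion; terminates since each item (t, d)
-- weighs 3^(d.toNat) and every step strictly shrinks the stack's total weight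
def descendLoop (stack : List (Int × Int)) (result : List Int) : List Int :=
  match stack with
  | [] => result
  | (timer, d) :: rest =>
    if d ≤ 0 then descendLoop rest (result ++ [timer])
    else if timer = 0 then descendLoop ((6, d - 1) :: (8, d - 1) :: rest) result
    else descendLoop ((timer - 1, d - 1) :: rest) result
termination_by (stack.map (fun p => 3 ^ p.2.toNat)).sum
decreasing_by
  · simp
  · simp only [List.map_cons, List.sum_cons]
    have hd : d.toNat = (d - 1).toNat + 1 := by omega
    rw [hd, pow_succ]
    have : 0 < 3 ^ (d - 1).toNat := by positivity
    omega
  · simp only [List.map_cons, List.sum_cons]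
    have hd : d.toNat = (d - 1).toNat + 1 := by omega
    rw [hd, pow_succ]
    have : 0 < 3 ^ (d - 1).toNat := by positivity
    omega

def spawn_for_py_alt (timers : List Int) (days : Int) : List Int :=
  timers.foldl (fun result t => descendLoop [(t, days)] result) []

-- ===== PRECONDITION & SPEC =====
def Spec_spawn_for_py (timers : List Int) (days : Int) (out : List Int) : Prop := out = spawn_for_py_alt timers days
instance (timers : List Int) (days : Int) (out : List Int) : Decidable (Spec_spawn_for_py timers days out) := by unfold Spec_spawn_for_py; infer_instance

-- ===== CLAIM (what is proved, stated in full; the proofs are below) =====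
def Claim_equal_spawn_for_py : Prop := ∀ (timers : List Int) (days : Int), Dom_spawn_for_py timers days → Spec_spawn_for_py timers days (spawn_for_py timers days)

-- ===== LEMMAS AND PROOFS =====

-- ghost recursive lineage of one fish, fuel = remaining days
def gdesc (t : Int) : Nat → List Int
  | 0 => [t]
  | n + 1 => if t = 0 then gdesc 6 n ++ gdesc 8 n else gdesc (t - 1) n

lemma gdesc_succ (t : Int) (n : Nat) :
    gdesc t (n + 1) = if t = 0 then gdesc 6 n ++ gdesc 8 n else gdesc (t - 1) n := rfl

-- one day's step on one fish
lemma step1_gdesc (t : Int) (n : Nat) :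
    (if t = 0 then ([6, 8] : List Int) else [t - 1]).flatMap (fun u => gdesc u n)
      = gdesc t (n + 1) := by
  by_cases h : t = 0 <;> simp [h, gdesc_succ]

lemma spawnStep_flatMap (ts : List Int) :
    spawnStep ts = ts.flatMap (fun t => if t = 0 then [6, 8] else [t - 1]) := by
  unfold spawnStep
  rw [show (fun (acc : List Int) timer => if timer = 0 then (acc ++ [6]) ++ [8] else acc ++ [timer - 1])
        = fun acc timer => acc ++ (if timer = 0 then [6, 8] else [timer - 1]) by
      funext acc timer; by_cases h : timer = 0 <;> simp [h]]
  simpa using PySem.List.foldl_append_eq_flatMap (fun t => if t = 0 then [6, 8] else [t - 1]) ts []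

-- A's whole-list simulation computes the concatenated lineages
lemma spawnLoop_gdesc (n : Nat) (ts : List Int) :
    spawnLoop n ts = ts.flatMap (fun t => gdesc t n) := by
  induction n generalizing ts with
  | zero => simp [spawnLoop, gdesc]
  | succ n ih =>
    rw [spawnLoop, ih, spawnStep_flatMap, List.flatMap_assoc]
    exact List.flatMap_congr (fun t _ => step1_gdesc t n)

-- B's stack loop flushes each stack item's lineage in order
lemma descendLoop_gdesc (stack : List (Int × Int)) (result : List Int) :
    descendLoop stack result = result ++ stack.flatMap (fun p => gdesc p.1 p.2.toNat) := by
  fun_induction descendLoop stack result with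
  | case1 res => simp
  | case2 res timer d rest h ih =>
    have h0 : d.toNat = 0 := by omega
    simp [ih, h0, gdesc]
  | case3 res d rest h ih =>
    have hd : d.toNat = (d - 1).toNat + 1 := by omega
    generalize hn : (d - 1).toNat = n at hd ih
    rw [ih]
    simp [hn, hd, gdesc_succ, List.append_assoc]
  | case4 res timer d rest h h0 ih =>
    have hd : d.toNat = (d - 1).toNat + 1 := by omega
    generalize hn : (d - 1).toNat = n at hd ih
    rw [ih]
    simp [hn, hd, gdesc_succ, h0]

theorem spawn_for_py_spec : Claim_equal_spawn_for_py := by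
  intro timers days _
  unfold Spec_spawn_for_py spawn_for_py spawn_for_py_alt
  rw [spawnLoop_gdesc,
      show (fun (result : List Int) t => descendLoop [(t, days)] result)
        = fun result t => result ++ gdesc t days.toNat by
      funext result t; simp [descendLoop_gdesc]]
  simpa using (PySem.List.foldl_append_eq_flatMap (fun t => gdesc t days.toNat) timers []).symm
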